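-- pv_equiv track=rewrite | github.com/svianaj/grib2sqlite | grib2sqlite/grib2sqlite.py | match_keys
-- ===== SOURCE A (Python) =====
-- def match_keys(p1, p2):
--     """Match two sets of grib key values.
--
--     Note that a key missing in p1 may be None in p2.
--
--     Args:
--       p1: a dictionary with GRIB2 key values
--       p2: a dictionary with GRIB2 key values
--
--     Returns:
--       True if all (not None) values are equal. False otherwise.
--     """
--     for k in list(set(list(p1.keys()) + list(p2.keys()))):
--         if k not in p1:
--             if p2[k] is not None:
--                 return False
--         elif k not in p2:
--             if p1[k] is not None:
--                 return False
--         elif p1[k] != p2[k]: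
--             return False
--     return True
-- ===== SOURCE B (Python) =====
-- def match_keys(p1, p2):
--     """Match two sets of grib key values (two-pass re-implementation).
--
--     True if all (not None) values are equal; a key missing on one side
--     must be None on the other.
--     """
--     for k, v in p1.items():
--         if k in p2:
--             if v != p2[k]:
--                 return False
--         elif v is not None:
--             return False
--     for k, v in p2.items():
--         if k not in p1 and v is not None:
--             return False
--     return True
-- ===== Notes on version B (the rewrite author's own statement) =====
-- stated objective: simpler
-- what changed: Instead of materialising the set union of both key lists and looking each key up in both dicts, B makes two direct passes over the dicts' own items (p1's items compared against p2, then p2's keys absent from p1 checked for None), so no union set is ever built.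
import Mathlib
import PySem

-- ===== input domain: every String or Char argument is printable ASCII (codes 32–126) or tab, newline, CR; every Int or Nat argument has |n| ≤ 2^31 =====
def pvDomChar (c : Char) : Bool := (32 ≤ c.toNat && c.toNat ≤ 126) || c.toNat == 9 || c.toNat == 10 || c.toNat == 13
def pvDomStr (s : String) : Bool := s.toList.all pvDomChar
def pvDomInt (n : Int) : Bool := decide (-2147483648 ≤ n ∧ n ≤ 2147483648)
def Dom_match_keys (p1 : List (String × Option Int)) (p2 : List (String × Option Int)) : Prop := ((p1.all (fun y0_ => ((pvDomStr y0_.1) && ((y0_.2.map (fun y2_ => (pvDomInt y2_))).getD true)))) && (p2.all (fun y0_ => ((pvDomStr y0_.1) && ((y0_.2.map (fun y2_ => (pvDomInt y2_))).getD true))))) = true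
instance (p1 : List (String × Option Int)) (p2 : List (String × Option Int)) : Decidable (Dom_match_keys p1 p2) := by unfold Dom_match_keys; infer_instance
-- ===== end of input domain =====

-- B replaces A's loop over the materialised set-union of key lists by two direct passes
-- over each dict's items (objective: simpler); return values proved equal on dict-like inputs.


-- ===== PORT A =====
-- for k in list(set(list(p1.keys()) + list(p2.keys()))): … return False … ; return True
-- (a `return False` inside the loop is an `all` over the distinct keys; the (none, none)
-- branch is unreachable since k comes from the union of the key lists)
def match_keys (p1 : List (String × Option Int)) (p2 : List (String × Option Int)) : Bool :=
  (PySem.Set.ofList (p1.map Prod.fst ++ p2.map Prod.fst)).all fun k =>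
    match (PySem.Dict.mk p1).get? k, (PySem.Dict.mk p2).get? k with
    | none, some v2 => v2 == none          -- k not in p1: p2[k] must be None
    | some v1, none => v1 == none          -- k not in p2: p1[k] must be None
    | some v1, some v2 => v1 == v2         -- both present: values must be equal
    | none, none => true

-- ===== PORT B =====
-- two passes: p1's items against p2, then p2's items whose key is absent from p1
def match_keys_alt (p1 : List (String × Option Int)) (p2 : List (String × Option Int)) : Bool :=
  (p1.all fun kv =>
    match (PySem.Dict.mk p2).get? kv.1 with
    | some v2 => kv.2 == v2                -- k in p2: values must be equal
    | none => kv.2 == none)                -- k not in p2: v must be None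
  &&
  (p2.all fun kv =>
    ((PySem.Dict.mk p1).get? kv.1).isSome || kv.2 == none)  -- k not in p1 → v is None

-- ===== PRECONDITION & SPEC =====
-- Pre_ requires each association list to have distinct keys: the Python arguments are
-- dicts, which cannot carry duplicate keys, so a list with duplicates encodes no Python input.
def Pre_match_keys (p1 : List (String × Option Int)) (p2 : List (String × Option Int)) : Prop :=
  (p1.map Prod.fst).Nodup ∧ (p2.map Prod.fst).Nodup
instance (p1 : List (String × Option Int)) (p2 : List (String × Option Int)) : Decidable (Pre_match_keys p1 p2) := by unfold Pre_match_keys; infer_instance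

def pvWitness_match_keys : (List (String × Option Int)) × (List (String × Option Int)) :=
  ([("a", some 1), ("c", some 2)], [("a", some 1), ("b", none)])

def Spec_match_keys (p1 : List (String × Option Int)) (p2 : List (String × Option Int)) (out : Bool) : Prop := out = match_keys_alt p1 p2
instance (p1 : List (String × Option Int)) (p2 : List (String × Option Int)) (out : Bool) : Decidable (Spec_match_keys p1 p2 out) := by unfold Spec_match_keys; infer_instance

-- ===== CLAIM (what is proved, stated in full; the proofs are below) =====
def Claim_equal_match_keys : Prop := ∀ (p1 : List (String × Option Int)) (p2 : List (String × Option Int)), Dom_match_keys p1 p2 → Pre_match_keys p1 p2 → Spec_match_keys p1 p2 (match_keys p1 p2)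

-- ===== LEMMAS AND PROOFS =====

-- first-match lookup on an association list with distinct keys is pair membership
theorem mk_get?_eq_some_iff (p : List (String × Option Int))
    (h : (p.map Prod.fst).Nodup) (k : String) (v : Option Int) :
    (PySem.Dict.mk p).get? k = some v ↔ (k, v) ∈ p :=
  PySem.Dict.get?_eq_some_iff_mem_items _ k v (by simpa [PySem.Dict.keys] using h)

theorem mk_get?_eq_none_iff (p : List (String × Option Int)) (k : String) :
    (PySem.Dict.mk p).get? k = none ↔ k ∉ p.map Prod.fst := by
  rw [PySem.Dict.get?_eq_none_iff_not_mem_keys]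
  simp [PySem.Dict.keys]

theorem match_keys_eq_alt (p1 p2 : List (String × Option Int))
    (h1 : (p1.map Prod.fst).Nodup) (h2 : (p2.map Prod.fst).Nodup) :
    match_keys p1 p2 = match_keys_alt p1 p2 := by
  unfold match_keys match_keys_alt
  rw [Bool.eq_iff_iff]
  simp only [List.all_eq_true, Bool.and_eq_true, PySem.Set.mem_ofList, List.mem_append]
  constructor
  · intro hA
    refine ⟨fun kv hkv => ?_, fun kv hkv => ?_⟩
    · obtain ⟨k, v⟩ := kv
      have hg1 : (PySem.Dict.mk p1).get? k = some v := (mk_get?_eq_some_iff p1 h1 k v).2 hkv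
      have := hA k (Or.inl (List.mem_map_of_mem hkv))
      cases hg2 : (PySem.Dict.mk p2).get? k with
      | none => simpa [hg1, hg2] using this
      | some v2 => simpa [hg1, hg2] using this
    · obtain ⟨k, v⟩ := kv
      have hg2 : (PySem.Dict.mk p2).get? k = some v := (mk_get?_eq_some_iff p2 h2 k v).2 hkv
      have := hA k (Or.inr (List.mem_map_of_mem hkv))
      cases hg1 : (PySem.Dict.mk p1).get? k with
      | none => simp only [hg1, hg2] at this; simp [this]
      | some v1 => simp
  · rintro ⟨hB1, hB2⟩ k hk
    cases hg1 : (PySem.Dict.mk p1).get? k with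
    | some v1 =>
        have hkv : (k, v1) ∈ p1 := (mk_get?_eq_some_iff p1 h1 k v1).1 hg1
        have := hB1 (k, v1) hkv
        cases hg2 : (PySem.Dict.mk p2).get? k with
        | none => simpa [hg2] using this
        | some v2 => simpa [hg2] using this
    | none =>
        have hk1 : k ∉ p1.map Prod.fst := (mk_get?_eq_none_iff p1 k).1 hg1
        have hk2 : k ∈ p2.map Prod.fst := hk.resolve_left hk1
        obtain ⟨kv, hkv, hfst⟩ := List.mem_map.1 hk2
        obtain ⟨k', v⟩ := kv
        have hfst' : k' = k := hfst
        subst hfst'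
        have hg2 : (PySem.Dict.mk p2).get? k' = some v := (mk_get?_eq_some_iff p2 h2 k' v).2 hkv
        have := hB2 (k', v) hkv
        rw [hg1] at this
        simp only [Option.isSome_none, Bool.false_or] at this
        simpa [hg2] using this

-- ===== VERDICT (by name: the statement is the Claim_ definition above) =====
theorem match_keys_spec : Claim_equal_match_keys := by
  intro p1 p2 _ hpre
  exact match_keys_eq_alt p1 p2 hpre.1 hpre.2
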